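-- pv_equiv track=rewrite | github.com/yoyo185644/TS3D-SQL | utils/parse.py | remove_subqueries
-- ===== SOURCE A (Python) =====
-- def remove_subqueries(sql):
--     """
--     使用正则表达式移除子查询部分。
--     支持处理嵌套括号和子查询中的逗号。
--     """
--     stack = []
--     result = []
--     i = 0
--
--     while i < len(sql):
--         char = sql[i]
--
--         # 检测子查询的开始
--         if char == '(' and sql[i + 1:i + 7].upper() == 'SELECT':
--             stack.append('(')  # 子查询开始入栈
--             i += 1
--             while stack and i < len(sql):
--                 # 检测括号的匹配
--                 if sql[i] == '(':
--                     stack.append('(')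
--                 elif sql[i] == ')':
--                     stack.pop()
--                 i += 1
--         else:
--             result.append(char)
--             i += 1
--
--     return ''.join(result)
-- ===== SOURCE B (Python) =====
-- def _close(sql, i):
--     # index just past the balanced region whose opening '(' is at index i
--     depth = 1
--     i += 1
--     n = len(sql)
--     while depth and i < n:
--         c = sql[i]
--         if c == '(':
--             depth += 1
--         elif c == ')':
--             depth -= 1
--         i += 1
--     return i
--
--
-- def remove_subqueries(sql):
--     parts = []
--     while True:
--         j = sql.upper().find('(SELECT')
--         if j == -1:
--             parts.append(sql)
--             return ''.join(parts)
--         parts.append(sql[:j])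
--         sql = sql[_close(sql, j):]
-- ===== Notes on version B (the rewrite author's own statement) =====
-- stated objective: faster
-- what changed: Replaces A's per-character Python scan with an explicit paren stack and nested skipping loop by a staged decomposition: repeatedly locate the next subquery opener with str.find on an uppercased copy, emit the slice before it, and jump past the balanced region.
import Mathlib
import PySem

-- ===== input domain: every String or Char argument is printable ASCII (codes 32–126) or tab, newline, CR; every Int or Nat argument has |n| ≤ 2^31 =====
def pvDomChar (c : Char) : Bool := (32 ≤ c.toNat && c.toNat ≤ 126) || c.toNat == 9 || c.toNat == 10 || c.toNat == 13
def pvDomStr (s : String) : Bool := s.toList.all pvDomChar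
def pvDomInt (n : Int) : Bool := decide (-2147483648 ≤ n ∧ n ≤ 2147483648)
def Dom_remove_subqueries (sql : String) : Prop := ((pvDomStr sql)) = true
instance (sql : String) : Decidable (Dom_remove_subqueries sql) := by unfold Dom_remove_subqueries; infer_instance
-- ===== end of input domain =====

-- B replaces A's char-by-char scan with an explicit stack by a staged decomposition: repeatedly
-- locate the next subquery opener with find on an uppercased copy, emit the slice before it, and
-- jump past the balanced region (objective: faster; measured faster in a timing run).

-- ===== PORT A =====
-- A's inner while-loop: stack of '(' characters; consumes chars until the stack
-- empties or the input ends, returns the remaining suffix.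
def pvAInner (stack : List Char) (cs : List Char) : List Char :=
  match stack, cs with
  | [], _ => cs
  | _ :: _, [] => []
  | s :: ss, c :: rest =>
    if c = '(' then pvAInner ('(' :: s :: ss) rest
    else if c = ')' then pvAInner ss rest
    else pvAInner (s :: ss) rest

theorem pvAInner_length_le (stack cs : List Char) : (pvAInner stack cs).length ≤ cs.length := by
  induction cs generalizing stack with
  | nil => cases stack <;> simp [pvAInner]
  | cons c rest ih =>
    cases stack with
    | nil => simp [pvAInner]
    | cons s ss =>
      simp only [pvAInner]
      split_ifs <;> exact Nat.le_trans (ih _) (Nat.le_succ _)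

-- A's outer while-loop over the remaining characters.
def pvALoop (cs : List Char) : List Char :=
  match cs with
  | [] => []
  | c :: rest =>
    if c = '(' ∧ PySem.Chars.upper (rest.take 6) = "SELECT".toList then
      pvALoop (pvAInner ['('] rest)
    else c :: pvALoop rest
termination_by cs.length
decreasing_by
  · exact Nat.lt_succ_of_le (pvAInner_length_le _ _)
  · simp

def remove_subqueries (sql : String) : String :=
  String.mk (pvALoop sql.toList)

-- ===== PORT B =====
-- Source B's _close helper: depth-counting while-loop, returned index past i+1 rendered as the
-- number of characters consumed after the opening parenthesis.
def pvClose (depth : Nat) (cs : List Char) : Nat :=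
  match cs with
  | [] => 0
  | c :: rest =>
    if depth = 0 then 0
    else if c = '(' then 1 + pvClose (depth + 1) rest
    else if c = ')' then 1 + pvClose (depth - 1) rest
    else 1 + pvClose depth rest

-- find points inside the string when it is not -1 (termination of the B loop).
theorem pvFind_lt (cs : List Char)
    (h : ¬ PySem.Chars.find (PySem.Chars.upper cs) "(SELECT".toList = -1) :
    (PySem.Chars.find (PySem.Chars.upper cs) "(SELECT".toList).toNat < cs.length := by
  have h0 : 0 ≤ PySem.Chars.find (PySem.Chars.upper cs) "(SELECT".toList := by
    exact (PySem.Chars.find_nonneg_iff (PySem.Chars.upper cs) "(SELECT".toList).mpr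
      ((PySem.Chars.find_ne_neg_one_iff (PySem.Chars.upper cs) "(SELECT".toList).mp h)
  have hpre := (PySem.Chars.find_spec h0).1
  by_contra hge
  rw [Nat.not_lt] at hge
  have hlen : (PySem.Chars.upper cs).length = cs.length := by
    simp [PySem.Chars.upper]
  have : (PySem.Chars.upper cs).drop
      (PySem.Chars.find (PySem.Chars.upper cs) "(SELECT".toList).toNat = [] :=
    List.drop_eq_nil_of_le (by omega)
  rw [this] at hpre
  exact absurd (List.prefix_nil.mp hpre) (by decide)

-- Source B's main while-loop: parts accumulator; each round finds the next "(SELECT" on the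
-- uppercased remaining string, appends the slice before it and drops through the balanced region.
def pvBLoop (parts : List (List Char)) (cs : List Char) : List Char :=
  if h : PySem.Chars.find (PySem.Chars.upper cs) "(SELECT".toList = -1 then
    PySem.Chars.join [] (parts ++ [cs])
  else
    pvBLoop (parts ++ [cs.take (PySem.Chars.find (PySem.Chars.upper cs) "(SELECT".toList).toNat])
      (cs.drop ((PySem.Chars.find (PySem.Chars.upper cs) "(SELECT".toList).toNat + 1 +
        pvClose 1 (cs.drop ((PySem.Chars.find (PySem.Chars.upper cs) "(SELECT".toList).toNat + 1))))
termination_by cs.length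
decreasing_by
  have := pvFind_lt cs h
  simp only [List.length_drop]
  omega

def remove_subqueries_alt (sql : String) : String :=
  String.mk (pvBLoop [] sql.toList)

-- ===== PRECONDITION & SPEC =====
def Spec_remove_subqueries (sql : String) (out : String) : Prop := out = remove_subqueries_alt sql
instance (sql : String) (out : String) : Decidable (Spec_remove_subqueries sql out) := by unfold Spec_remove_subqueries; infer_instance

-- ===== CLAIM (what is proved, stated in full; the proofs are below) =====
def Claim_equal_remove_subqueries : Prop := ∀ (sql : String), Dom_remove_subqueries sql → Spec_remove_subqueries sql (remove_subqueries sql)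

-- ===== LEMMAS AND PROOFS =====

theorem join_nil_flatten (xs : List (List Char)) : PySem.Chars.join [] xs = xs.flatten := by
  have h : ∀ ys : List (List Char), (List.intersperse ([] : List Char) ys).flatten = ys.flatten := by
    intro ys
    induction ys with
    | nil => rfl
    | cons p ps ih =>
      cases ps with
      | nil => rfl
      | cons q qs => simp_all [List.intersperse]
  simp [PySem.Chars.join, List.intercalate, h]

theorem upperChar_eq_paren (c : Char) : PySem.Chars.upperChar c = '(' ↔ c = '(' := by
  constructor
  · intro h
    unfold PySem.Chars.upperChar at h
    split_ifs at h with hl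
    · exfalso
      unfold PySem.Chars.islower at hl
      simp only [Bool.and_eq_true, decide_eq_true_eq] at hl
      have hb1 : 97 ≤ c.toNat := hl.1
      have hb2 : c.toNat ≤ 122 := hl.2
      have hv : Nat.isValidChar (c.toNat - 32) := by
        unfold Nat.isValidChar; left; omega
      have h3 := congrArg Char.toNat h
      rw [Char.toNat_ofNat, if_pos hv] at h3
      have h40 : '('.toNat = 40 := rfl
      rw [h40] at h3
      omega
    · exact h
  · intro h; subst h; decide

-- head trigger of A's loop ↔ "(SELECT" is a prefix of the uppercased string
theorem trig_iff (c : Char) (rest : List Char) :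
    ("(SELECT".toList <+: PySem.Chars.upper (c :: rest)) ↔
      (c = '(' ∧ PySem.Chars.upper (rest.take 6) = "SELECT".toList) := by
  have hc : "(SELECT".toList = '(' :: "SELECT".toList := rfl
  rw [hc]
  simp only [PySem.Chars.upper, List.map_cons, List.cons_prefix_cons]
  constructor
  · rintro ⟨h1, h2⟩
    refine ⟨(upperChar_eq_paren c).mp h1.symm, ?_⟩
    rw [List.prefix_iff_eq_take] at h2
    have h6 : ("SELECT".toList).length = 6 := rfl
    rw [h6, ← List.map_take] at h2
    exact h2.symm
  · rintro ⟨h1, h2⟩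
    refine ⟨by rw [h1]; decide, ?_⟩
    rw [List.prefix_iff_eq_take]
    have h6 : ("SELECT".toList).length = 6 := rfl
    rw [h6, ← List.map_take]
    exact h2.symm

-- A's inner loop consumes exactly the characters pvClose counts.
theorem pvAInner_drop (cs : List Char) : ∀ d,
    pvAInner (List.replicate d '(') cs = cs.drop (pvClose d cs) := by
  induction cs with
  | nil => intro d; cases d <;> simp [pvAInner, pvClose, List.replicate]
  | cons c rest ih =>
    intro d
    cases d with
    | zero => simp [pvAInner, pvClose, List.replicate]
    | succ e =>
      have hdrop : ∀ (a : Char) (k : Nat), List.drop (1 + k) (a :: rest) = List.drop k rest := by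
        intro a k; rw [Nat.add_comm, List.drop_succ_cons]
      rw [show List.replicate (e + 1) '(' = '(' :: List.replicate e '(' from rfl,
        pvAInner, pvClose]
      simp only [Nat.succ_ne_zero, if_false, Nat.add_sub_cancel]
      by_cases h1 : c = '('
      · simp only [h1, if_true]
        rw [hdrop, ← ih (e + 1 + 1)]
        rfl
      · simp only [h1, if_false]
        by_cases h2 : c = ')'
        · simp only [h2, if_true]
          rw [hdrop]
          exact ih e
        · simp only [h2, if_false]
          rw [hdrop, ← ih (e + 1)]
          rfl

-- if no position of cs starts "(SELECT" (case-insensitively), A copies cs unchanged.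
theorem pvALoop_id (cs : List Char)
    (h : ∀ i, ¬ ("(SELECT".toList <+: (PySem.Chars.upper cs).drop i)) : pvALoop cs = cs := by
  induction cs with
  | nil => simp [pvALoop]
  | cons c rest ih =>
    have h0 := h 0
    rw [List.drop_zero] at h0
    rw [pvALoop, if_neg (fun hc => h0 ((trig_iff c rest).mpr hc))]
    congr 1
    apply ih
    intro i
    have := h (i + 1)
    simpa [PySem.Chars.upper] using this

-- if the first trigger is at position j, A copies the first j characters and then
-- runs its inner loop from position j+1.
theorem pvALoop_skip : ∀ j cs,
    (∀ i < j, ¬ ("(SELECT".toList <+: (PySem.Chars.upper cs).drop i)) →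
    ("(SELECT".toList <+: (PySem.Chars.upper cs).drop j) →
    pvALoop cs = cs.take j ++ pvALoop (pvAInner ['('] (cs.drop (j + 1))) := by
  intro j
  induction j with
  | zero =>
    intro cs _ htrig
    rw [List.drop_zero] at htrig
    cases cs with
    | nil => exact absurd (List.prefix_nil.mp htrig) (by decide)
    | cons c rest =>
      rw [pvALoop, if_pos ((trig_iff c rest).mp htrig)]
      simp
  | succ j ih =>
    intro cs hno htrig
    cases cs with
    | nil =>
      simp only [PySem.Chars.upper, List.map_nil, List.drop_nil] at htrig
      exact absurd (List.prefix_nil.mp htrig) (by decide)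
    | cons c rest =>
      have h0 := hno 0 (Nat.succ_pos j)
      rw [List.drop_zero] at h0
      rw [pvALoop, if_neg (fun hc => h0 ((trig_iff c rest).mpr hc))]
      rw [List.take_succ_cons, List.drop_succ_cons, List.cons_append]
      congr 1
      apply ih
      · intro i hi
        have := hno (i + 1) (Nat.succ_lt_succ hi)
        simpa [PySem.Chars.upper] using this
      · simpa [PySem.Chars.upper] using htrig

-- main invariant: B's loop produces the joined parts followed by A's result on the rest.
theorem pvBLoop_eq : ∀ n cs, cs.length ≤ n → ∀ parts,
    pvBLoop parts cs = (parts.flatten) ++ pvALoop cs := by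
  intro n
  induction n with
  | zero =>
    intro cs h parts
    have : cs = [] := List.eq_nil_of_length_eq_zero (Nat.le_zero.mp h)
    subst this
    rw [pvBLoop, dif_pos (by decide : PySem.Chars.find (PySem.Chars.upper ([] : List Char)) "(SELECT".toList = -1)]
    simp [pvALoop, join_nil_flatten]
  | succ n ih =>
    intro cs h parts
    by_cases hf : PySem.Chars.find (PySem.Chars.upper cs) "(SELECT".toList = -1
    · rw [pvBLoop, dif_pos hf, join_nil_flatten]
      have hid : pvALoop cs = cs := by
        apply pvALoop_id
        intro i hpre
        have : "(SELECT".toList <:+: PySem.Chars.upper cs :=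
          List.infix_iff_prefix_suffix.mpr ⟨_, hpre, List.drop_suffix _ _⟩
        exact (PySem.Chars.find_eq_neg_one_iff _ _).mp hf this
      rw [hid]
      simp
    · rw [pvBLoop, dif_neg hf]
      have h0 : 0 ≤ PySem.Chars.find (PySem.Chars.upper cs) "(SELECT".toList :=
        (PySem.Chars.find_nonneg_iff _ _).mpr
          ((PySem.Chars.find_ne_neg_one_iff _ _).mp hf)
      obtain ⟨hpre, hmin⟩ := PySem.Chars.find_spec h0
      set j := (PySem.Chars.find (PySem.Chars.upper cs) "(SELECT".toList).toNat with hj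
      have hjlt : j < cs.length := pvFind_lt cs hf
      -- A up to the trigger
      have hA : pvALoop cs = cs.take j ++ pvALoop (pvAInner ['('] (cs.drop (j + 1))) :=
        pvALoop_skip j cs (fun i hi => hmin i hi) hpre
      -- replace the inner loop by the pvClose drop
      have hinner : pvAInner ['('] (cs.drop (j + 1)) =
          (cs.drop (j + 1)).drop (pvClose 1 (cs.drop (j + 1))) := by
        have := pvAInner_drop (cs.drop (j + 1)) 1
        simpa [List.replicate] using this
      have hdd : (cs.drop (j + 1)).drop (pvClose 1 (cs.drop (j + 1))) =
          cs.drop (j + 1 + pvClose 1 (cs.drop (j + 1))) := by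
        rw [List.drop_drop]
      have hlen : (cs.drop (j + 1 + pvClose 1 (cs.drop (j + 1)))).length ≤ n := by
        simp only [List.length_drop]
        omega
      rw [ih _ hlen]
      rw [hA, hinner, hdd]
      simp

-- ===== VERDICT (by name: the statement is the Claim_ definition above) =====
theorem remove_subqueries_spec : Claim_equal_remove_subqueries := by
  intro sql _
  unfold Spec_remove_subqueries remove_subqueries remove_subqueries_alt
  rw [pvBLoop_eq sql.toList.length sql.toList (Nat.le_refl _) []]
  simp
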